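-- pv_equiv track=rewrite | github.com/Dimitrije-Jimmy/AdventOfCode2024 | day17/main8.3.py | reverse_engineer_program
-- ===== SOURCE A (Python) =====
-- def f(A):
--     """Simulate the output-producing function based on A."""
--     B = (A % 8) ^ 1
--     C = A >> B
--     B = B ^ 4
--     B = B ^ C
--     return B % 8
--
-- def generate_candidates_for_output(output, current_candidates):
--     """
--     Reverse the operations to generate all possible A values that could produce the given output.
--
--     Args:
--         output (int): The required output at the current step.
--         current_candidates (set): The set of A values from the previous step.
--
--     Returns:
--         set: New set of A candidates for the previous step.
--     """
--     new_candidates = set()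
--
--     # For each current candidate, undo the division by 8 and explore all 8 possible lower bits (0..7)
--     for candidate in current_candidates:
--         for lower_bits in range(8):
--             A = (candidate << 3) + lower_bits  # Undo A // 8
--             if f(A) == output:
--                 new_candidates.add(A)
--
--     return new_candidates
--
-- def reverse_engineer_program(program):
--     """
--     Reverse the program to determine the smallest initial A that produces the program as output.
--
--     Args:
--         program (list): The program input, which must match the output sequence.
--
--     Returns:
--         int: The smallest initial A value that produces the program as output.
--     """
--     n = len(program)
--     outputs = program[::-1]  # Reverse the program to work backward
--
--     # Step 1: Start with the last output
--     candidates = set()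
--     for A in range(8):  # Only need to consider A values with the lowest 3 bits matching
--         if f(A) == outputs[0]:
--             candidates.add(A)
--
--     # Step 2: Work backward through the outputs
--     for output in outputs[1:]:
--         candidates = generate_candidates_for_output(output, candidates)
--         if not candidates:
--             return None  # No valid candidates found
--
--     # Step 3: Validate candidates by running the program forward
--     def execute_forward(A, program_length):
--         """Run the forward program to produce the output sequence."""
--         outputs = []
--         for _ in range(program_length):
--             B = (A % 8) ^ 1
--             C = A >> B
--             B = B ^ 4
--             B = B ^ C
--             outputs.append(B % 8)
--             A = A // 8
--         return outputs
--
--     valid_candidates = []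
--     for A in candidates:
--         if execute_forward(A, n) == program:
--             valid_candidates.append(A)
--
--     return min(valid_candidates) if valid_candidates else None
-- ===== SOURCE B (Python) =====
-- def f(A):
--     """Simulate the output-producing function based on A."""
--     B = (A % 8) ^ 1
--     C = A >> B
--     B = B ^ 4
--     B = B ^ C
--     return B % 8
--
--
-- def reverse_engineer_program(program):
--     """Depth-first search building A from the most-significant 3-bit group down."""
--
--     def dfs(pos, A):
--         """Smallest full value extending A through positions pos..0, or None."""
--         if pos < 0:
--             return A
--         best = None
--         for d in range(8):
--             cand = A * 8 + d
--             if f(cand) == program[pos]: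
--                 r = dfs(pos - 1, cand)
--                 if r is not None and (best is None or r < best):
--                     best = r
--         return best
--
--     return dfs(len(program) - 1, 0)
-- ===== Notes on version B (the rewrite author's own statement) =====
-- stated objective: alternative
-- what changed: Replaced the breadth-first candidate-set expansion (a set of all partial A values per output, plus a separate forward-execution validation and min) with a depth-first recursion that builds A one 3-bit digit at a time from the most significant group down, returning the minimum over successful branches.
import Mathlib
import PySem

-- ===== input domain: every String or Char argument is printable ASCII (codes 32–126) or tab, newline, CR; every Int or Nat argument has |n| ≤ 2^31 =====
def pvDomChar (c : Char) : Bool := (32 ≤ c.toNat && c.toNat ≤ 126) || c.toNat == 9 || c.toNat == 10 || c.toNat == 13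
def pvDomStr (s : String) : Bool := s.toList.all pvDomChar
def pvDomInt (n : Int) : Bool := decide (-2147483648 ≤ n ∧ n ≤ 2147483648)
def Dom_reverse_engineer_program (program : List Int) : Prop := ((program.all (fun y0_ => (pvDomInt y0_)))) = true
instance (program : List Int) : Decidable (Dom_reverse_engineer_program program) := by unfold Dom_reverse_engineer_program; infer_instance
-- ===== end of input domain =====

-- B replaces A's breadth-first candidate-set expansion + forward revalidation by a top-down
-- depth-first search over 3-bit digits (objective: alternative algorithm, same exact result).

-- ===== PORT A =====

-- f(A): Python-exact for every Int A (mod 8 of a positive divisor is nonnegative, so the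
-- shift amount B is a genuine Nat and `>>>` is Python's `>>`).
def pyF (A : Int) : Int :=
  let B := PySem.Int.bxor (PySem.Int.mod A 8) 1
  let C := A >>> B.toNat
  let B2 := PySem.Int.bxor B 4
  let B3 := PySem.Int.bxor B2 C
  PySem.Int.mod B3 8

-- generate_candidates_for_output: nested loops over the current set and range(8).
-- `candidate << 3` is `candidate <<< (3 : Nat)` (Python-exact, also on negatives).
def genCandidates (output : Int) (current : PySem.Set Int) : PySem.Set Int :=
  current.foldl
    (fun nc (candidate : Int) =>
      (PySem.List.pyRange 0 8 1).foldl
        (fun nc lowerBits =>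
          let A : Int := (candidate <<< (3 : Nat)) + lowerBits
          if pyF A == output then PySem.Set.add nc A else nc)
        nc)
    PySem.Set.empty

-- the `for output in outputs[1:]` loop with its early `return None` on an empty set
def runBackward (outs : List Int) (cands : PySem.Set Int) : Option (PySem.Set Int) :=
  match outs with
  | [] => some cands
  | o :: rest =>
      let c := genCandidates o cands
      if c.isEmpty then none else runBackward rest c

-- execute_forward(A, program_length): the inlined body is definitionally pyF
def execFwd (A : Int) : Nat → List Int
  | 0 => []
  | Nat.succ k =>
      (let B := PySem.Int.bxor (PySem.Int.mod A 8) 1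
       let C := A >>> B.toNat
       let B2 := PySem.Int.bxor B 4
       let B3 := PySem.Int.bxor B2 C
       PySem.Int.mod B3 8) :: execFwd (PySem.Int.floordiv A 8) k

def reverse_engineer_program (program : List Int) : Option Int :=
  let n := program.length
  match PySem.List.slice? program none none (-1) with   -- program[::-1]; step -1 never raises
  | none => none
  | some outputs =>
    match PySem.List.pyGet? outputs 0 with              -- outputs[0]: IndexError on [], outside Pre_
    | none => none
    | some o0 =>
      let cands0 := (PySem.List.pyRange 0 8 1).foldl
        (fun s A => if pyF A == o0 then PySem.Set.add s A else s) PySem.Set.empty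
      match runBackward (PySem.List.slice outputs (some 1) none) cands0 with
      | none => none
      | some cands =>
        let valids := cands.foldl
          (fun acc A => if execFwd A n == program then acc ++ [A] else acc) ([] : List Int)
        if valids.isEmpty then none else PySem.List.min? valids (fun x => x)

-- ===== PORT B =====

-- dfs(pos, A): try each top digit d, recurse on the extended prefix, keep the minimum
def dfsB (program : List Int) (pos : Int) (A : Int) : Option Int :=
  if pos < 0 then some A
  else
    (PySem.List.pyRange 0 8 1).foldl
      (fun best d =>
        let cand := A * 8 + d
        if PySem.List.pyGet? program pos == some (pyF cand) then
          match dfsB program (pos - 1) cand with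
          | none => best
          | some r =>
            match best with
            | none => some r
            | some b => if r < b then some r else some b
        else best)
      none
termination_by (pos + 1).toNat
decreasing_by simp only [not_lt] at *; omega

def reverse_engineer_program_alt (program : List Int) : Option Int :=
  dfsB program ((program.length : Int) - 1) 0

-- ===== PRECONDITION & SPEC =====
-- Pre_ excludes only the empty program, on which A raises IndexError (outputs[0]);
-- B returns some 0 there (0 produces the empty output sequence).
def Pre_reverse_engineer_program (program : List Int) : Prop := program ≠ []
instance (program : List Int) : Decidable (Pre_reverse_engineer_program program) := by
  unfold Pre_reverse_engineer_program; infer_instance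

def pvWitness_reverse_engineer_program : List Int := [0]

def Spec_reverse_engineer_program (program : List Int) (out : Option Int) : Prop :=
  out = reverse_engineer_program_alt program
instance (program : List Int) (out : Option Int) : Decidable (Spec_reverse_engineer_program program out) := by
  unfold Spec_reverse_engineer_program; infer_instance

-- ===== CLAIM (what is proved, stated in full; the proofs are below) =====
def Claim_equal_reverse_engineer_program : Prop := ∀ (program : List Int), Dom_reverse_engineer_program program → Pre_reverse_engineer_program program → Spec_reverse_engineer_program program (reverse_engineer_program program)

-- ===== LEMMAS AND PROOFS =====

-- "o is the minimum of the set P" (none = P empty)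
def OMinOf (P : Int → Prop) (o : Option Int) : Prop :=
  match o with
  | none => ∀ m, ¬ P m
  | some m => P m ∧ ∀ m', P m' → m ≤ m'

def omin2 (o1 o2 : Option Int) : Option Int :=
  match o1, o2 with
  | none, r => r
  | some b, none => some b
  | some b, some r => if r < b then some r else some b

theorem oMinOf_congr {P Q : Int → Prop} {o : Option Int} (h : ∀ m, P m ↔ Q m)
    (hm : OMinOf P o) : OMinOf Q o := by
  cases o with
  | none => intro m hq; exact hm m ((h m).mpr hq)
  | some m => exact ⟨(h m).mp hm.1, fun m' hq => hm.2 m' ((h m').mpr hq)⟩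

theorem oMinOf_unique {P : Int → Prop} {o1 o2 : Option Int}
    (h1 : OMinOf P o1) (h2 : OMinOf P o2) : o1 = o2 := by
  cases o1 with
  | none =>
    cases o2 with
    | none => rfl
    | some m => exact absurd h2.1 (h1 m)
  | some m =>
    cases o2 with
    | none => exact absurd h1.1 (h2 m)
    | some m' => exact congrArg some (le_antisymm (h1.2 m' h2.1) (h2.2 m h1.1))

theorem oMinOf_omin2 {P Q : Int → Prop} {o1 o2 : Option Int}
    (h1 : OMinOf P o1) (h2 : OMinOf Q o2) :
    OMinOf (fun m => P m ∨ Q m) (omin2 o1 o2) := by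
  cases o1 with
  | none =>
    cases o2 with
    | none => intro m hm; rcases hm with h | h; exacts [h1 m h, h2 m h]
    | some r =>
      exact ⟨Or.inr h2.1, fun m' hm' => by
        rcases hm' with h | h; exacts [absurd h (h1 m'), h2.2 m' h]⟩
  | some b =>
    cases o2 with
    | none =>
      exact ⟨Or.inl h1.1, fun m' hm' => by
        rcases hm' with h | h; exacts [h1.2 m' h, absurd h (h2 m')]⟩
    | some r =>
      show OMinOf _ (if r < b then some r else some b)
      split_ifs with hrb
      · exact ⟨Or.inr h2.1, fun m' hm' => by
          rcases hm' with h | h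
          · exact le_of_lt (lt_of_lt_of_le hrb (h1.2 m' h))
          · exact h2.2 m' h⟩
      · exact ⟨Or.inl h1.1, fun m' hm' => by
          rcases hm' with h | h
          · exact h1.2 m' h
          · exact le_trans (not_lt.mp hrb) (h2.2 m' h)⟩

theorem foldl_omin2 (g : Int → Option Int) (S : Int → Int → Prop) (l : List Int)
    (h : ∀ d ∈ l, OMinOf (S d) (g d)) (acc : Option Int) (P0 : Int → Prop)
    (hacc : OMinOf P0 acc) :
    OMinOf (fun m => P0 m ∨ ∃ d ∈ l, S d m)
      (l.foldl (fun b d => omin2 b (g d)) acc) := by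
  induction l generalizing acc P0 with
  | nil => simpa using hacc
  | cons x t ih =>
    simp only [List.foldl_cons]
    have := ih (fun d hd => h d (List.mem_cons_of_mem _ hd)) (omin2 acc (g x))
      (fun m => P0 m ∨ S x m) (oMinOf_omin2 hacc (h x List.mem_cons_self))
    refine oMinOf_congr (fun m => ?_) this
    constructor
    · rintro (⟨h0 | hx⟩ | ⟨d, hd, hs⟩)
      · exact Or.inl h0
      · exact Or.inr ⟨x, List.mem_cons_self, hx⟩
      · exact Or.inr ⟨d, List.mem_cons_of_mem _ hd, hs⟩
    · rintro (h0 | ⟨d, hd, hs⟩)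
      · exact Or.inl (Or.inl h0)
      · rcases List.mem_cons.mp hd with rfl | hd
        · exact Or.inl (Or.inr hs)
        · exact Or.inr ⟨d, hd, hs⟩

-- the search tree of B, as a predicate: Ext k A m ⟺ m extends prefix A through k more digits,
-- each prefix value passing the pyF check against program
def ExtP (program : List Int) : Nat → Int → Int → Prop
  | 0, A, m => m = A
  | Nat.succ k, A, m =>
      ∃ d, 0 ≤ d ∧ d < 8 ∧ pyF (A * 8 + d) = program.getD k 0 ∧ ExtP program k (A * 8 + d) m

theorem dfsB_isMin (program : List Int) :
    ∀ (k : Nat) (A : Int), k ≤ program.length →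
      OMinOf (ExtP program k A) (dfsB program ((k : Int) - 1) A) := by
  intro k
  induction k with
  | zero =>
    intro A _
    rw [dfsB, if_pos (by norm_num)]
    exact ⟨rfl, fun m' h => le_of_eq (h ▸ rfl)⟩
  | succ k ih =>
    intro A hk
    have hklt : k < program.length := by omega
    have hget : PySem.List.pyGet? program ((k : Nat) : Int) = some (program.getD k 0) := by
      rw [PySem.List.pyGet?_natCast]
      simp [List.getElem?_eq_getElem hklt, List.getD]
    have hpos1 : (((k + 1 : Nat)) : Int) - 1 = ((k : Nat) : Int) := by push_cast; omega
    rw [dfsB, if_neg (by push_cast; omega), hpos1]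
    have hcongr : (PySem.List.pyRange 0 8 1).foldl
        (fun best d =>
          let cand := A * 8 + d
          if PySem.List.pyGet? program ((k : Nat) : Int) == some (pyF cand) then
            match dfsB program (((k : Nat) : Int) - 1) cand with
            | none => best
            | some r =>
              match best with
              | none => some r
              | some b => if r < b then some r else some b
          else best) none
        = (PySem.List.pyRange 0 8 1).foldl
            (fun best d => omin2 best
              (if program.getD k 0 = pyF (A * 8 + d) then
                dfsB program (((k : Nat) : Int) - 1) (A * 8 + d) else none)) none := by
      refine PySem.List.foldl_congr_mem _ _ _ _ (fun best d _ => ?_)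
      show (if (PySem.List.pyGet? program ((k : Nat) : Int) == some (pyF (A * 8 + d))) = true
            then _ else best) = _
      rw [hget]
      by_cases hc : program.getD k 0 = pyF (A * 8 + d)
      · rw [if_pos (by simpa [List.getD] using hc), if_pos hc]
        cases dfsB program (((k : Nat) : Int) - 1) (A * 8 + d) with
        | none => cases best <;> rfl
        | some r => cases best <;> rfl
      · rw [if_neg (by simpa [List.getD] using hc), if_neg hc]
        cases best <;> rfl
    rw [hcongr]
    have hfold := foldl_omin2
      (fun d => if program.getD k 0 = pyF (A * 8 + d) then
        dfsB program (((k : Nat) : Int) - 1) (A * 8 + d) else none)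
      (fun d m => program.getD k 0 = pyF (A * 8 + d) ∧ ExtP program k (A * 8 + d) m)
      (PySem.List.pyRange 0 8 1)
      (fun d _ => by
        dsimp only
        by_cases hc : program.getD k 0 = pyF (A * 8 + d)
        · rw [if_pos hc]
          exact oMinOf_congr (fun m => ⟨fun h => ⟨hc, h⟩, fun h => h.2⟩)
            (ih (A * 8 + d) (le_of_lt hklt))
        · rw [if_neg hc]
          exact fun m hm => hc hm.1)
      none (fun _ => False) (fun m h => h)
    refine oMinOf_congr (fun m => ?_) hfold
    constructor
    · rintro (h | ⟨d, hd, hc, he⟩)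
      · exact h.elim
      · rcases (PySem.List.mem_pyRange_one).mp hd with ⟨h0, h8⟩
        exact ⟨d, h0, h8, hc.symm, he⟩
    · rintro ⟨d, h0, h8, hc, he⟩
      exact Or.inr ⟨d, (PySem.List.mem_pyRange_one).mpr ⟨h0, h8⟩, hc.symm, he⟩

theorem execFwd_succ (A : Int) (k : Nat) :
    execFwd A (k + 1) = pyF A :: execFwd (PySem.Int.floordiv A 8) k := rfl

theorem length_execFwd (A : Int) (k : Nat) : (execFwd A k).length = k := by
  induction k generalizing A with
  | zero => rfl
  | succ k ih => simp [execFwd_succ, ih]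

theorem floordiv_eight (p : Int) : PySem.Int.floordiv p 8 = p / 8 :=
  PySem.Int.floordiv_eq_ediv_of_pos (by norm_num)

theorem ediv_ediv_eight (m : Int) (k : Nat) : m / 8 / 8 ^ k = m / 8 ^ (k + 1) := by
  rw [Int.ediv_ediv_of_nonneg (hy := by norm_num)]
  norm_num [pow_succ, mul_comm]

theorem execFwd_add (p : Int) (k2 k1 : Nat) :
    execFwd p (k2 + k1) = execFwd p k2 ++ execFwd (p / 8 ^ k2) k1 := by
  induction k2 generalizing p with
  | zero => simp [execFwd]
  | succ k ih =>
    have : k + 1 + k1 = (k + k1) + 1 := by omega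
    rw [this, execFwd_succ, execFwd_succ, ih, floordiv_eight, ediv_ediv_eight]
    simp

-- bridge: B's search tree below prefix A is exactly the interval [A*8^k, (A+1)*8^k) filtered
-- by forward execution matching the first k program entries
theorem extP_iff (program : List Int) :
    ∀ (k : Nat) (A m : Int), k ≤ program.length → 0 ≤ A →
      (ExtP program k A m ↔
        (A * 8 ^ k ≤ m ∧ m < (A + 1) * 8 ^ k ∧ execFwd m k = program.take k)) := by
  intro k
  induction k with
  | zero =>
    intro A m _ _
    show m = A ↔ _
    simp only [pow_zero, mul_one, List.take_zero]
    constructor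
    · rintro rfl; exact ⟨le_refl _, by omega, rfl⟩
    · rintro ⟨h1, h2, _⟩; omega
  | succ k ih =>
    intro A m hk hA
    have hklt : k < program.length := by omega
    have hpow : (0 : Int) < 8 ^ k := by positivity
    have htake : program.take (k + 1) = program.take k ++ [program.getD k 0] := by
      rw [List.take_add_one]
      simp [List.getElem?_eq_getElem hklt, List.getD]
    have hsplit : execFwd m (k + 1) = execFwd m k ++ [pyF (m / 8 ^ k)] := by
      rw [execFwd_add m k 1]
      rfl
    constructor
    · rintro ⟨d, hd0, hd8, hpf, he⟩
      have hA' : (0 : Int) ≤ A * 8 + d := by omega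
      rcases (ih (A * 8 + d) m (le_of_lt hklt) hA').mp he with ⟨h1, h2, h3⟩
      have hq : m / 8 ^ k = A * 8 + d := by
        have hle : A * 8 + d ≤ m / 8 ^ k := (Int.le_ediv_iff_mul_le hpow).mpr h1
        have hlt : m / 8 ^ k < A * 8 + d + 1 := (Int.ediv_lt_iff_lt_mul hpow).mpr h2
        omega
      refine ⟨?_, ?_, ?_⟩
      · calc A * 8 ^ (k + 1) = (A * 8) * 8 ^ k := by ring
          _ ≤ (A * 8 + d) * 8 ^ k := by nlinarith
          _ ≤ m := h1
      · calc m < (A * 8 + d + 1) * 8 ^ k := h2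
          _ ≤ ((A + 1) * 8) * 8 ^ k := by nlinarith
          _ = (A + 1) * 8 ^ (k + 1) := by ring
      · rw [hsplit, htake, h3, hq, hpf]
    · rintro ⟨h1, h2, h3⟩
      have hle : A * 8 ≤ m / 8 ^ k := by
        refine (Int.le_ediv_iff_mul_le hpow).mpr ?_
        calc A * 8 * 8 ^ k = A * 8 ^ (k + 1) := by ring
          _ ≤ m := h1
      have hlt : m / 8 ^ k < (A + 1) * 8 := by
        refine (Int.ediv_lt_iff_lt_mul hpow).mpr ?_
        calc m < (A + 1) * 8 ^ (k + 1) := h2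
          _ = (A + 1) * 8 * 8 ^ k := by ring
      rw [hsplit, htake] at h3
      have hlen : (execFwd m k).length = (program.take k).length := by
        rw [length_execFwd, List.length_take_of_le (le_of_lt hklt)]
      rcases List.append_inj h3 hlen with ⟨h4, h5⟩
      have h6 : pyF (m / 8 ^ k) = program.getD k 0 := by
        simpa using h5
      refine ⟨m / 8 ^ k - A * 8, by omega, by omega, ?_, ?_⟩
      · have h7 : A * 8 + (m / 8 ^ k - A * 8) = m / 8 ^ k := by ring
        rw [h7]; exact h6
      · have hq : A * 8 + (m / 8 ^ k - A * 8) = m / 8 ^ k := by ring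
        rw [hq]
        refine (ih (m / 8 ^ k) m (le_of_lt hklt) (by omega)).mpr ⟨?_, ?_, h4⟩
        · exact Int.ediv_mul_le m (ne_of_gt hpow)
        · exact Int.lt_ediv_add_one_mul_self m hpow

-- A-side stage predicate: after processing the reversed outputs `os`
def StageP (os : List Int) (p : Int) : Prop :=
  0 ≤ p ∧ p < 8 ^ os.length ∧ execFwd p os.length = os.reverse

theorem shl3 (c : Int) : (c <<< (3 : Nat)) = c * 8 := by simp [Int.shiftLeft_eq]

theorem mem_genInner (o c : Int) (nc : PySem.Set Int) (x : Int) :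
    x ∈ (PySem.List.pyRange 0 8 1).foldl
      (fun nc lb => if pyF ((c <<< (3 : Nat)) + lb) == o then
        PySem.Set.add nc ((c <<< (3 : Nat)) + lb) else nc) nc ↔
    x ∈ nc ∨ ∃ d, 0 ≤ d ∧ d < 8 ∧ x = (c <<< (3 : Nat)) + d ∧ pyF x = o := by
  rw [PySem.List.foldl_if_eq_foldl_filter, PySem.Set.mem_foldl_add]
  simp only [List.mem_filter, PySem.List.mem_pyRange_one, beq_iff_eq]
  constructor
  · rintro (h | ⟨b, ⟨⟨hb0, hb8⟩, hpf⟩, rfl⟩)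
    · exact Or.inl h
    · exact Or.inr ⟨b, hb0, hb8, rfl, hpf⟩
  · rintro (h | ⟨d, hd0, hd8, rfl, hpf⟩)
    · exact Or.inl h
    · exact Or.inr ⟨d, ⟨⟨hd0, hd8⟩, hpf⟩, rfl⟩

theorem mem_genAux (o : Int) : ∀ (l : List Int) (acc : PySem.Set Int) (x : Int),
    x ∈ l.foldl (fun nc (c : Int) => (PySem.List.pyRange 0 8 1).foldl
      (fun nc lb => if pyF ((c <<< (3 : Nat)) + lb) == o then
        PySem.Set.add nc ((c <<< (3 : Nat)) + lb) else nc) nc) acc ↔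
    x ∈ acc ∨ ∃ c ∈ l, ∃ d, 0 ≤ d ∧ d < 8 ∧ x = (c <<< (3 : Nat)) + d ∧ pyF x = o := by
  intro l
  induction l with
  | nil => simp
  | cons c t ih =>
    intro acc x
    rw [List.foldl_cons, ih, mem_genInner]
    constructor
    · rintro ((h | ⟨d, hd⟩) | ⟨c', hc', hd⟩)
      · exact Or.inl h
      · exact Or.inr ⟨c, List.mem_cons_self, d, hd⟩
      · exact Or.inr ⟨c', List.mem_cons_of_mem _ hc', hd⟩
    · rintro (h | ⟨c', hc', hd⟩)
      · exact Or.inl (Or.inl h)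
      · rcases List.mem_cons.mp hc' with rfl | hc'
        · exact Or.inl (Or.inr hd)
        · exact Or.inr ⟨c', hc', hd⟩

theorem mem_genCandidates (o : Int) (cs : PySem.Set Int) (x : Int) :
    x ∈ genCandidates o cs ↔
      ∃ c ∈ (cs : List Int), ∃ d, 0 ≤ d ∧ d < 8 ∧
        x = (c <<< (3 : Nat)) + d ∧ pyF x = o := by
  show x ∈ (cs : List Int).foldl _ PySem.Set.empty ↔ _
  rw [mem_genAux]
  simp [PySem.Set.empty]

theorem genCandidates_char (o : Int) (cs : PySem.Set Int) (os : List Int) (_hos : os ≠ [])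
    (h : ∀ p, p ∈ (cs : List Int) ↔ StageP os p) :
    ∀ p, p ∈ (genCandidates o cs : List Int) ↔ StageP (os ++ [o]) p := by
  intro p
  rw [mem_genCandidates]
  have hpow : (0 : Int) < 8 ^ os.length := by positivity
  constructor
  · rintro ⟨c, hc, d, hd0, hd8, rfl, hpf⟩
    rcases (h c).mp hc with ⟨hc0, hclt, hcex⟩
    rw [shl3]
    refine ⟨by omega, ?_, ?_⟩
    · simp only [List.length_append, List.length_cons, List.length_nil]
      rw [pow_succ]
      nlinarith
    · simp only [List.length_append, List.length_cons, List.length_nil,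
        List.reverse_append, List.reverse_cons, List.reverse_nil, List.nil_append,
        List.cons_append]
      rw [execFwd_succ, floordiv_eight]
      have hdiv : (c * 8 + d) / 8 = c := by omega
      rw [hdiv, hcex]
      rw [shl3] at hpf
      simp [hpf]
  · rintro ⟨hp0, hplt, hpex⟩
    simp only [List.length_append, List.length_cons, List.length_nil] at hplt
    rw [pow_succ] at hplt
    refine ⟨p / 8, (h _).mpr ⟨by omega, by nlinarith [Int.ediv_mul_le p (by norm_num : (8:Int) ≠ 0), Int.lt_ediv_add_one_mul_self p (by norm_num : (0:Int) < 8)], ?_⟩,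
      p % 8, by omega, by omega, by rw [shl3]; omega, ?_⟩
    · simp only [List.length_append, List.length_cons, List.length_nil,
        List.reverse_append, List.reverse_cons, List.reverse_nil, List.nil_append,
        List.cons_append] at hpex
      rw [execFwd_succ, floordiv_eight] at hpex
      exact (List.cons.injEq _ _ _ _ ▸ hpex).2
    · simp only [List.length_append, List.length_cons, List.length_nil,
        List.reverse_append, List.reverse_cons, List.reverse_nil, List.nil_append,
        List.cons_append] at hpex
      rw [execFwd_succ] at hpex
      exact (List.cons.injEq _ _ _ _ ▸ hpex).1

theorem stageP_empty_mono (os more : List Int) (h : ∀ q, ¬ StageP os q) :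
    ∀ p, ¬ StageP (os ++ more) p := by
  rintro p ⟨hp0, hplt, hpex⟩
  have hpow2 : (0 : Int) < 8 ^ more.length := by positivity
  refine h (p / 8 ^ more.length) ⟨Int.ediv_nonneg hp0 (le_of_lt hpow2), ?_, ?_⟩
  · refine (Int.ediv_lt_iff_lt_mul hpow2).mpr ?_
    calc p < 8 ^ (os ++ more).length := hplt
      _ = 8 ^ os.length * 8 ^ more.length := by
          rw [List.length_append, pow_add]
  · have hlen : (os ++ more).length = more.length + os.length := by
      rw [List.length_append]; omega
    rw [hlen, execFwd_add p more.length os.length] at hpex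
    rw [List.reverse_append] at hpex
    have hl : (execFwd p more.length).length = more.reverse.length := by
      rw [length_execFwd, List.length_reverse]
    exact (List.append_inj hpex hl).2

theorem runBackward_char (rest : List Int) :
    ∀ (cs : PySem.Set Int) (os : List Int), os ≠ [] →
      (∀ p, p ∈ (cs : List Int) ↔ StageP os p) →
      (match runBackward rest cs with
       | none => ∀ p, ¬ StageP (os ++ rest) p
       | some cs' => ∀ p, p ∈ (cs' : List Int) ↔ StageP (os ++ rest) p) := by
  induction rest with
  | nil => intro cs os _ h; simpa using h
  | cons o rest ih =>
    intro cs os hos h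
    have hc := genCandidates_char o cs os hos h
    have hrw : runBackward (o :: rest) cs =
        if (genCandidates o cs).isEmpty then none
        else runBackward rest (genCandidates o cs) := rfl
    rw [hrw]
    by_cases he : (genCandidates o cs).isEmpty
    · rw [if_pos he]
      have hnil : (genCandidates o cs : List Int) = [] := List.isEmpty_iff.mp he
      have hempty : ∀ q, ¬ StageP (os ++ [o]) q := fun q hq => by
        have := (hc q).mpr hq
        rw [hnil] at this
        exact absurd this (List.not_mem_nil)
      have := stageP_empty_mono (os ++ [o]) rest hempty
      simpa using this
    · rw [if_neg he]
      have := ih (genCandidates o cs) (os ++ [o]) (by simp) hc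
      rcases hres : runBackward rest (genCandidates o cs) with _ | cs'
      · rw [hres] at this
        simpa using this
      · rw [hres] at this
        simpa using this

theorem execFwd_one (q : Int) : execFwd q 1 = [pyF q] := rfl

theorem mem_cands0 (o0 p : Int) :
    p ∈ ((PySem.List.pyRange 0 8 1).foldl
      (fun s A => if pyF A == o0 then PySem.Set.add s A else s) PySem.Set.empty : List Int) ↔
    StageP [o0] p := by
  rw [PySem.List.foldl_if_eq_foldl_filter, PySem.Set.mem_foldl_add (f := fun b => b)]
  simp only [List.mem_filter, PySem.List.mem_pyRange_one, beq_iff_eq]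
  constructor
  · rintro (h | ⟨b, ⟨⟨hb0, hb8⟩, hpf⟩, rfl⟩)
    · exact absurd h (List.not_mem_nil)
    · exact ⟨hb0, by simpa using hb8, by simp [execFwd_one, hpf]⟩
  · rintro ⟨hp0, hplt, hpex⟩
    refine Or.inr ⟨p, ⟨⟨hp0, by simpa using hplt⟩, ?_⟩, rfl⟩
    simp only [List.length_cons, List.length_nil, List.reverse_cons, List.reverse_nil,
      List.nil_append] at hpex
    have h1 : execFwd p 1 = [pyF p] := rfl
    rw [h1] at hpex
    simpa using hpex

theorem reverse_engineer_program_isMin (program : List Int) (hne : program ≠ []) :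
    OMinOf (StageP program.reverse) (reverse_engineer_program program) := by
  rcases hrev : program.reverse with _ | ⟨o0, t⟩
  · exact absurd (List.reverse_eq_nil_iff.mp hrev) hne
  unfold reverse_engineer_program
  rw [PySem.List.slice?_none_none_neg_one, hrev]
  simp only [PySem.List.pyGet?_zero_cons, PySem.List.slice_from_one, List.tail_cons]
  have hstage1 := mem_cands0 o0
  have hloop := runBackward_char t _ [o0] (by simp) (fun p => hstage1 p)
  rcases hres : runBackward t ((PySem.List.pyRange 0 8 1).foldl
      (fun s A => if pyF A == o0 then PySem.Set.add s A else s) PySem.Set.empty) with _ | cs'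
  · rw [hres] at hloop
    simp only at hloop
    intro m hm
    exact hloop m (by simpa using hm)
  · rw [hres] at hloop
    simp only at hloop
    have hmem : ∀ p, p ∈ ((cs' : List Int).foldl
        (fun acc A => if execFwd A program.length == program then acc ++ [A] else acc)
        ([] : List Int)) ↔ StageP (o0 :: t) p := by
      intro p
      rw [PySem.List.foldl_append_if_eq_filter]
      simp only [List.nil_append, List.mem_filter, beq_iff_eq]
      constructor
      · rintro ⟨hp, _⟩
        exact (hloop p).mp hp
      · intro hp
        refine ⟨(hloop p).mpr hp, ?_⟩
        have hlen : (o0 :: t).length = program.length := by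
          rw [← hrev, List.length_reverse]
        have := hp.2.2
        rw [hlen] at this
        rw [this, ← hrev, List.reverse_reverse]
    dsimp only
    by_cases hemp : ((cs' : List Int).foldl
        (fun acc A => if execFwd A program.length == program then acc ++ [A] else acc)
        ([] : List Int)).isEmpty
    · rw [if_pos hemp]
      intro m hm
      have h1 : m ∈ ((cs' : List Int).foldl
          (fun acc A => if execFwd A program.length == program then acc ++ [A] else acc)
          ([] : List Int)) := (hmem m).mpr (by simpa [hrev] using hm)
      rw [List.isEmpty_iff.mp hemp] at h1
      exact absurd h1 (List.not_mem_nil)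
    · rw [if_neg hemp]
      rcases hmin : PySem.List.min? ((cs' : List Int).foldl
          (fun acc A => if execFwd A program.length == program then acc ++ [A] else acc)
          ([] : List Int)) (fun x => x) with _ | m
      · exact absurd ((PySem.List.min?_eq_none_iff _ _).mp hmin)
          (by simpa [List.isEmpty_iff] using hemp)
      · refine ⟨by simpa [hrev] using (hmem m).mp (PySem.List.min?_mem hmin), ?_⟩
        intro m' hm'
        exact PySem.List.min?_isMin hmin m' ((hmem m').mpr (by simpa [hrev] using hm'))

-- ===== VERDICT (by name: the statement is the Claim_ definition above) =====
theorem reverse_engineer_program_spec : Claim_equal_reverse_engineer_program := by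
  intro program _ hpre
  unfold Spec_reverse_engineer_program
  have hA := reverse_engineer_program_isMin program hpre
  have hB := dfsB_isMin program program.length 0 (le_refl _)
  have hbridge : ∀ m, ExtP program program.length 0 m ↔ StageP program.reverse m := by
    intro m
    rw [extP_iff program program.length 0 m (le_refl _) (le_refl 0)]
    unfold StageP
    rw [List.length_reverse, List.reverse_reverse, List.take_length]
    simp only [zero_mul, zero_add, one_mul]
  exact oMinOf_unique hA (oMinOf_congr hbridge hB)
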